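-- pv_equiv track=rewrite | github.com/boostcampaitech7/level4-nlp-finalproject-hackathon-nlp-14-lv3 | src/rule_retriever.py | find_company_date
-- ===== SOURCE A (Python) =====
-- def find_company_date(data):
--     """
--     Given a nested dict with the following structure:
--       {
--          company_name: {
--              date_string: {
--                  key1: list,
--                  key2: list,
--                  key3: list,
--                  key4: list
--              },
--              ...
--          },
--          ...
--       }
--
--     This function returns a tuple (company_name, date_string) for the first inner dict
--     where all 4 lists are non-empty. If none exist, it returns the (company_name, date_string)
--     for the inner dict that has the highest total number of elements across the 4 lists.
--     """
--     best_company = None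
--     best_date = None
--     best_total = -1
--
--     # Iterate over companies and their dates (order is the dict order)
--     for company, dates in data.items():
--         for date, inner in dates.items():
--             # Check if all four keys have a non-empty list.
--             # (We assume here that inner always has exactly 4 keys.)
--             if all(inner[key] for key in inner):
--                 # Found one that meets the condition: return immediately.
--                 return company, date
--
--             # Otherwise, count the total number of elements in all lists.
--             total = sum(len(inner[key]) for key in inner)
--             if total > best_total:
--                 best_total = total
--                 best_company = company
--                 best_date = date
--
--     return best_company, best_date
-- ===== SOURCE B (Python) =====
-- def find_company_date(data):
--     # Flatten into (company, date, inner) entries in dict order,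
--     # then do two separate passes: early-return search, then max-by-total.
--     entries = [(c, d, inner)
--                for c, dates in data.items()
--                for d, inner in dates.items()]
--     for c, d, inner in entries:
--         if all(inner.values()):
--             return c, d
--     if not entries:
--         return None, None
--     best = max(entries, key=lambda e: sum(len(v) for v in e[2].values()))
--     return best[0], best[1]
-- ===== Notes on version B (the rewrite author's own statement) =====
-- stated objective: simpler
-- what changed: Replaces the single interleaved loop that tracks a running best while searching with a flatten into entry tuples followed by two separate passes: a find-first search, then max() with a size key (first-maximal tie-break).
import Mathlib
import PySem

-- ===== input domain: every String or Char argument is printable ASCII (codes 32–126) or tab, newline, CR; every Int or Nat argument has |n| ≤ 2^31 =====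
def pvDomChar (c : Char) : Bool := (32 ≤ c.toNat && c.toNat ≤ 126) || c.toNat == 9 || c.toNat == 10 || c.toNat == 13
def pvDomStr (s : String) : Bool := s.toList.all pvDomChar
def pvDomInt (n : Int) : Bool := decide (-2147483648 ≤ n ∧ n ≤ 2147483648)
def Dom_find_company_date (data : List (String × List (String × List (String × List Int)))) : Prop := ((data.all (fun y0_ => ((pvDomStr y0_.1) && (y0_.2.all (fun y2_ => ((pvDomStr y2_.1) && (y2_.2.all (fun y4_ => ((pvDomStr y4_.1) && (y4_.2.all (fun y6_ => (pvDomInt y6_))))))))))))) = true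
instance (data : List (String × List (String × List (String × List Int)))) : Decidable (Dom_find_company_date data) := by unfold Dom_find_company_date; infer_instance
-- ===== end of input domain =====

-- B replaces A's single interleaved search-and-track-best loop with a flatten into
-- entry tuples and two separate passes (find-first, then first-maximal max); same cost.

-- ===== PORT A =====
-- state: (best_company, best_date, best_total)
-- inner loop over (date, inner) pairs of one company; .inl = early return
def pvA_dates (company : String) :
    List (String × List (String × List Int)) →
    (Option String × Option String × Int) →
    Sum (String × String) (Option String × Option String × Int)
  | [], st => .inr st
  | (date, inner) :: rest, st =>
    if inner.all (fun kv => !kv.2.isEmpty) then .inl (company, date)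
    else
      let total : Int := inner.foldl (fun acc kv => acc + (kv.2.length : Int)) 0
      let st' := if total > st.2.2 then (some company, some date, total) else st
      pvA_dates company rest st'

def pvA_outer :
    List (String × List (String × List (String × List Int))) →
    (Option String × Option String × Int) →
    Option String × Option String
  | [], st => (st.1, st.2.1)
  | (company, dates) :: rest, st =>
    match pvA_dates company dates st with
    | .inl (c, d) => (some c, some d)
    | .inr st' => pvA_outer rest st'

def find_company_date (data : List (String × List (String × List (String × List Int)))) : Option String × Option String :=
  pvA_outer data (none, none, -1)

-- ===== PORT B =====
def pvB_entries (data : List (String × List (String × List (String × List Int)))) :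
    List (String × String × List (String × List Int)) :=
  data.flatMap (fun cd => cd.2.map (fun di => (cd.1, di.1, di.2)))

-- sum(len(v) for v in e[2].values())
def pvB_size (inner : List (String × List Int)) : Int :=
  (inner.map (fun kv => (kv.2.length : Int))).sum

def find_company_date_alt (data : List (String × List (String × List (String × List Int)))) : Option String × Option String :=
  let entries := pvB_entries data
  match entries.find? (fun e => e.2.2.all (fun kv => !kv.2.isEmpty)) with
  | some e => (some e.1, some e.2.1)
  | none =>
    match entries with
    | [] => (none, none)
    | e :: rest =>
      -- max(entries, key=…): first maximal element
      let best := rest.foldl (fun b e' => if pvB_size e'.2.2 > pvB_size b.2.2 then e' else b) e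
      (some best.1, some best.2.1)

-- ===== PRECONDITION & SPEC =====
def Spec_find_company_date (data : List (String × List (String × List (String × List Int)))) (out : Option String × Option String) : Prop := out = find_company_date_alt data
instance (data : List (String × List (String × List (String × List Int)))) (out : Option String × Option String) : Decidable (Spec_find_company_date data out) := by unfold Spec_find_company_date; infer_instance

-- ===== CLAIM (what is proved, stated in full; the proofs are below) =====
def Claim_equal_find_company_date : Prop := ∀ (data : List (String × List (String × List (String × List Int)))), Dom_find_company_date data → Spec_find_company_date data (find_company_date data)

-- ===== LEMMAS AND PROOFS =====

-- A's nested loops, flattened onto the entry list (proof-side bridge)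
def pvAgo :
    List (String × String × List (String × List Int)) →
    (Option String × Option String × Int) →
    Option String × Option String
  | [], st => (st.1, st.2.1)
  | e :: rest, st =>
    if e.2.2.all (fun kv => !kv.2.isEmpty) then (some e.1, some e.2.1)
    else
      let total : Int := e.2.2.foldl (fun acc kv => acc + (kv.2.length : Int)) 0
      pvAgo rest (if total > st.2.2 then (some e.1, some e.2.1, total) else st)

def pvAgo_partial :
    List (String × String × List (String × List Int)) →
    (Option String × Option String × Int) →
    Sum (String × String) (Option String × Option String × Int)
  | [], st => .inr st
  | e :: rest, st =>
    if e.2.2.all (fun kv => !kv.2.isEmpty) then .inl (e.1, e.2.1)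
    else
      let total : Int := e.2.2.foldl (fun acc kv => acc + (kv.2.length : Int)) 0
      pvAgo_partial rest (if total > st.2.2 then (some e.1, some e.2.1, total) else st)

theorem pvTotal_eq (inner : List (String × List Int)) :
    inner.foldl (fun acc kv => acc + (kv.2.length : Int)) 0 = pvB_size inner := by
  have h : ∀ (l : List (String × List Int)) (a : Int),
      l.foldl (fun acc kv => acc + (kv.2.length : Int)) a = a + pvB_size l := by
    intro l
    induction l with
    | nil => intro a; simp [pvB_size]
    | cons x xs ih => intro a; simp [List.foldl, pvB_size, ih, List.sum_cons]; ring
  simpa using h inner 0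

theorem pvB_size_nonneg (inner : List (String × List Int)) : 0 ≤ pvB_size inner := by
  unfold pvB_size
  induction inner with
  | nil => simp
  | cons x xs ih => simp only [List.map_cons, List.sum_cons]; positivity

theorem pvAgo_append (l₁ l₂ : List (String × String × List (String × List Int)))
    (st : Option String × Option String × Int) :
    pvAgo (l₁ ++ l₂) st =
      match (pvAgo_partial l₁ st : Sum (String × String) (Option String × Option String × Int)) with
      | .inl (c, d) => (some c, some d)
      | .inr st' => pvAgo l₂ st' := by
  induction l₁ generalizing st with
  | nil => simp [pvAgo_partial]
  | cons e rest ih =>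
    simp only [List.cons_append, pvAgo, pvAgo_partial]
    by_cases h : e.2.2.all (fun kv => !kv.2.isEmpty) = true
    · simp [h]
    · simp [h, ih]

theorem pvA_dates_eq (company : String)
    (dates : List (String × List (String × List Int)))
    (st : Option String × Option String × Int) :
    pvA_dates company dates st =
      pvAgo_partial (dates.map (fun di => (company, di.1, di.2))) st := by
  induction dates generalizing st with
  | nil => rfl
  | cons d rest ih =>
    simp only [pvA_dates, List.map_cons, pvAgo_partial]
    by_cases h : d.2.all (fun kv => !kv.2.isEmpty) = true
    · simp [h]
    · simp [h, ih]

theorem pvA_flatten (data : List (String × List (String × List (String × List Int))))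
    (st : Option String × Option String × Int) :
    pvA_outer data st = pvAgo (pvB_entries data) st := by
  induction data generalizing st with
  | nil => rfl
  | cons cd rest ih =>
    simp only [pvA_outer, pvB_entries, List.flatMap_cons]
    rw [show (List.flatMap (fun cd => cd.2.map (fun di => (cd.1, di.1, di.2))) rest)
          = pvB_entries rest from rfl]
    rw [pvAgo_append, pvA_dates_eq]
    cases h : pvAgo_partial (cd.2.map (fun di => (cd.1, di.1, di.2))) st with
    | inl p => cases p; rfl
    | inr st' => simp [ih]

-- fold-max invariant: A's state tracking equals B's first-maximal fold
theorem pvAgo_fold_eq (rest : List (String × String × List (String × List Int)))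
    (e : String × String × List (String × List Int)) :
    List.foldl
        (fun st x =>
          if pvB_size x.2.2 > st.2.2 then (some x.1, some x.2.1, pvB_size x.2.2) else st)
        (some e.1, some e.2.1, pvB_size e.2.2) rest =
      (let b := rest.foldl
          (fun b e' => if pvB_size e'.2.2 > pvB_size b.2.2 then e' else b) e
       (some b.1, some b.2.1, pvB_size b.2.2)) := by
  induction rest generalizing e with
  | nil => rfl
  | cons x xs ih =>
    simp only [List.foldl]
    by_cases h : pvB_size x.2.2 > pvB_size e.2.2
    · simp [h, ih]
    · simp [h, ih]

-- characterisation of the flattened A-loop when no entry qualifies: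
theorem pvAgo_none (entries : List (String × String × List (String × List Int)))
    (hfind : entries.find? (fun e => e.2.2.all (fun kv => !kv.2.isEmpty)) = none)
    (st : Option String × Option String × Int) :
    pvAgo entries st =
      (let b := entries.foldl
          (fun st x =>
            if pvB_size x.2.2 > st.2.2 then (some x.1, some x.2.1, pvB_size x.2.2) else st) st
       (b.1, b.2.1)) := by
  induction entries generalizing st with
  | nil => rfl
  | cons e rest ih =>
    have he : (e.2.2.all (fun kv => !kv.2.isEmpty)) = false := by
      by_contra h
      simp only [Bool.not_eq_false] at h
      simp [List.find?, h] at hfind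
    have hrest : rest.find? (fun e => e.2.2.all (fun kv => !kv.2.isEmpty)) = none := by
      simp only [List.find?, he] at hfind; exact hfind
    simp only [pvAgo, he, Bool.false_eq_true, if_false, List.foldl, pvTotal_eq]
    exact ih hrest _

theorem pvAgo_some (entries : List (String × String × List (String × List Int)))
    (e : String × String × List (String × List Int))
    (hfind : entries.find? (fun e => e.2.2.all (fun kv => !kv.2.isEmpty)) = some e)
    (st : Option String × Option String × Int) :
    pvAgo entries st = (some e.1, some e.2.1) := by
  induction entries generalizing st with
  | nil => simp at hfind
  | cons x rest ih =>
    by_cases h : (x.2.2.all (fun kv => !kv.2.isEmpty)) = true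
    · simp only [List.find?, h] at hfind
      simp only [Option.some.injEq] at hfind
      subst hfind
      simp [pvAgo, h]
    · simp only [List.find?] at hfind
      simp only [Bool.not_eq_true] at h
      simp only [h] at hfind
      simp only [pvAgo, h, Bool.false_eq_true, if_false]
      exact ih hfind _

-- ===== VERDICT (by name: the statement is the Claim_ definition above) =====
theorem find_company_date_spec : Claim_equal_find_company_date := by
  intro data _
  unfold Spec_find_company_date find_company_date find_company_date_alt
  rw [pvA_flatten]
  cases hfind : (pvB_entries data).find? (fun e => e.2.2.all (fun kv => !kv.2.isEmpty)) with
  | some e => simp only [hfind, pvAgo_some _ e hfind]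
  | none =>
    rw [pvAgo_none _ hfind]
    cases hE : pvB_entries data with
    | nil => simp
    | cons e rest =>
      rw [hE] at hfind
      simp only [List.foldl]
      have h0 : pvB_size e.2.2 > (-1 : Int) := lt_of_lt_of_le (by norm_num) (pvB_size_nonneg _)
      simp only [gt_iff_lt, h0, if_pos]
      rw [pvAgo_fold_eq]
      simp [hfind]
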